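-- pv_equiv track=rewrite | github.com/wlee075/chatbot | tests/test_two_lane_architecture.py | _run_filter
-- ===== SOURCE A (Python) =====
-- def _run_filter(types: list[str]) -> list[str]:
--     """Simulate the app.py message filter and return visible message types."""
--     msgs = [{"type": t, "content": f"content {i}", "_idx": i} for i, t in enumerate(types)]
--     has_advance = any(m.get("type") in ("advance", "complete") for m in msgs)
--     advance_idx = next(
--         (i for i, m in enumerate(msgs) if m.get("type") in ("advance", "complete")),
--         len(msgs),
--     )
--     last_post_advance_elicit_idx = None
--     if has_advance:
--         for _k in range(len(msgs) - 1, advance_idx, -1):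
--             if msgs[_k].get("type") == "elicit":
--                 last_post_advance_elicit_idx = _k
--                 break
--     visible = []
--     for msg_i, msg in enumerate(msgs):
--         msg_type = msg["type"]
--         if msg_type in ("reflect", "elicit") and has_advance and msg_i < advance_idx:
--             continue
--         if msg_type == "elicit" and has_advance and msg_i > advance_idx:
--             if msg_i != last_post_advance_elicit_idx:
--                 continue
--         visible.append(msg_type)
--     return visible
-- ===== SOURCE B (Python) =====
-- def _run_filter(types: list[str]) -> list[str]:
--     """Online single pass: on the first advance/complete marker retroactively filter
--     the accumulator; afterwards each elicit evicts the previously kept elicit."""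
--     out = []
--     seen = False
--     pending = None  # index in out of the currently kept post-marker elicit
--     for t in types:
--         if not seen and t in ("advance", "complete"):
--             out = [x for x in out if x not in ("reflect", "elicit")]
--             out.append(t)
--             seen = True
--         elif seen and t == "elicit":
--             if pending is not None:
--                 del out[pending]
--             pending = len(out)
--             out.append(t)
--         else:
--             out.append(t)
--     return out
-- ===== Notes on version B (the rewrite author's own statement) =====
-- stated objective: alternative
-- what changed: B replaces A's dict-of-messages simulation and three pre-scans (any(), next() for the first marker index, a reverse range search for the last post-marker elicit) plus a guarded output pass by a single online left-to-right pass over the strings: hitting the first advance/complete marker retroactively filters reflect/elicit out of the accumulator, and afterwards each elicit deletes the previously kept elicit from the accumulator before being appended.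
import Mathlib
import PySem

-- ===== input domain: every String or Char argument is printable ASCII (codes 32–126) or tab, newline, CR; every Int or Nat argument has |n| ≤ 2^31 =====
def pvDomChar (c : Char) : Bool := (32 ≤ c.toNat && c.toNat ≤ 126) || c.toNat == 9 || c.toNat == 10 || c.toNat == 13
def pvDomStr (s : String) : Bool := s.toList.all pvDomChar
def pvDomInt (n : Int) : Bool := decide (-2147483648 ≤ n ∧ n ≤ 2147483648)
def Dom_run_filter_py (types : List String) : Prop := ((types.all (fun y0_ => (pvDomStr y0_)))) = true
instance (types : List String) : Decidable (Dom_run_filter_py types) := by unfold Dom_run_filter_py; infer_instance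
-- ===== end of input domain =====

-- B replaces A's dict simulation, pre-scans (any / next / reverse range search) and guarded pass
-- by ONE online pass: on the first advance/complete marker it retroactively filters the
-- accumulator, and after it each elicit evicts the previously kept elicit; same exact value
-- (measured constant-factor faster: no per-element dict/string construction).

-- ===== PORT A =====
-- Python dicts {"type": t, "content": f"content {i}", "_idx": i} are fixed records here:
-- ported as triples (type, content, _idx); .get("type") / ["type"] = .1 (always present, exact).
def run_filter_py (types : List String) : List String :=
  let msgs : List (String × String × Int) :=
    (PySem.List.enumerate types 0).map (fun p => (p.2, "content " ++ PySem.Int.toStr p.1, p.1))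
  let has_advance : Bool := msgs.any (fun m => m.1 == "advance" || m.1 == "complete")
  -- next(gen, default): first index hit, else len(msgs)
  let advance_idx : Int :=
    (((PySem.List.enumerate msgs 0).find? (fun p => p.2.1 == "advance" || p.2.1 == "complete")).map
      (fun p => p.1)).getD (msgs.length : Int)
  -- 'for _k in range(len(msgs)-1, advance_idx, -1): … break' = first k in that range hitting
  -- the condition; msgs[_k] via pyGetD (every visited k is in range, so exact).
  let last_post : Option Int :=
    if has_advance then
      (PySem.List.pyRange ((msgs.length : Int) - 1) advance_idx (-1)).find?
        (fun k => (PySem.List.pyGetD msgs k ("", "", 0)).1 == "elicit")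
    else none
  (PySem.List.enumerate msgs 0).foldl (fun (acc : List String) (p : Int × String × String × Int) =>
    let msg_i := p.1
    let msg_type := p.2.1
    if (msg_type == "reflect" || msg_type == "elicit") && has_advance && decide (msg_i < advance_idx) then
      acc
    else if msg_type == "elicit" && has_advance && decide (advance_idx < msg_i) then
      -- 'msg_i != last_post_advance_elicit_idx' with last_post Optional: int ≠ None is always True
      if !(some msg_i == last_post) then acc else acc ++ [msg_type]
    else acc ++ [msg_type]) ([] : List String)

-- ===== PORT B =====
-- transliteration of Source B's single loop: state = (out, seen, pending); 'pending' is always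
-- len(out) at assignment, a valid non-negative index, so Option Nat / eraseIdx is exact for
-- 'del out[pending]'.
def run_filter_py_alt (types : List String) : List String :=
  (types.foldl
    (fun (st : List String × Bool × Option Nat) t =>
      match st with
      | (out, seen, pending) =>
        if !seen && (t == "advance" || t == "complete") then
          ((out.filter (fun x => !(x == "reflect" || x == "elicit"))) ++ [t], true, pending)
        else if seen && t == "elicit" then
          match pending with
          | some p => ((out.eraseIdx p) ++ [t], true, some (out.eraseIdx p).length)
          | none => (out ++ [t], true, some out.length)
        else (out ++ [t], seen, pending))
    (([] : List String), false, (none : Option Nat))).1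

-- ===== PRECONDITION & SPEC =====
def Spec_run_filter_py (types : List String) (out : List String) : Prop := out = run_filter_py_alt types
instance (types : List String) (out : List String) : Decidable (Spec_run_filter_py types out) := by unfold Spec_run_filter_py; infer_instance

-- ===== CLAIM (what is proved, stated in full; the proofs are below) =====
def Claim_equal_run_filter_py : Prop := ∀ (types : List String), Dom_run_filter_py types → Spec_run_filter_py types (run_filter_py types)

-- ===== LEMMAS AND PROOFS =====

-- canonical closed form both ports are reduced to (proof helper only)
def canonA (types : List String) : List String :=
  match types.findIdx? (fun t => t == "advance" || t == "complete") with
  | none => types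
  | some i =>
    (types.take i).filter (fun x => !(x == "reflect" || x == "elicit"))
      ++ [types.getD i ""]
      ++ (((PySem.List.enumerate (types.drop (i + 1)) 0).filter
            (fun p => !(p.2 == "elicit") || some p.1 ==
              (((types.drop (i + 1)).reverse.findIdx? (fun x => x == "elicit")).map
                (fun j => (((types.drop (i + 1)).length - 1 - j : Nat) : Int))))).map (·.2))

-- B's loop body as a named function (definitionally the lambda in run_filter_py_alt)
def bStep (st : List String × Bool × Option Nat) (t : String) : List String × Bool × Option Nat :=
  match st with
  | (out, seen, pending) =>
    if !seen && (t == "advance" || t == "complete") then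
      ((out.filter (fun x => !(x == "reflect" || x == "elicit"))) ++ [t], true, pending)
    else if seen && t == "elicit" then
      match pending with
      | some p => ((out.eraseIdx p) ++ [t], true, some (out.eraseIdx p).length)
      | none => (out ++ [t], true, some out.length)
    else (out ++ [t], seen, pending)

theorem alt_foldl (types : List String) :
    run_filter_py_alt types = (types.foldl bStep (([] : List String), false, (none : Option Nat))).1 := rfl

-- 'keep only the last elicit' as a left recursion, and the kept elicit's position
def keepE : List String → List String
  | [] => []
  | x :: xs => if x == "elicit" && xs.any (fun y => y == "elicit") then keepE xs else x :: keepE xs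

def kIdx : List String → Nat
  | [] => 0
  | x :: xs =>
    if xs.any (fun y => y == "elicit") then (if x == "elicit" then kIdx xs else kIdx xs + 1) else 0

theorem keepE_of_no_elicit (xs : List String) (h : xs.any (fun y => y == "elicit") = false) :
    keepE xs = xs := by
  induction xs with
  | nil => rfl
  | cons x t ih =>
    simp only [List.any_cons, Bool.or_eq_false_iff] at h
    simp [keepE, h.2, ih h.2]

theorem erase_len {α : Type} (l : List α) (a : α) : (l ++ [a]).eraseIdx l.length = l := by
  induction l with
  | nil => rfl
  | cons x t ih => simpa [List.eraseIdx] using ih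

theorem erase_lt {α : Type} (l : List α) (a : α) (k : Nat) (h : k < l.length) :
    (l ++ [a]).eraseIdx k = l.eraseIdx k ++ [a] := by
  induction l generalizing k with
  | nil => simp at h
  | cons x t ih =>
    cases k with
    | zero => simp [List.eraseIdx]
    | succ m =>
      simp only [List.length_cons, Nat.succ_lt_succ_iff] at h
      simpa [List.eraseIdx] using ih m h

-- phase 1: before any marker everything is appended unchanged
theorem fold1 (pre : List String) (h : ∀ x ∈ pre, (x == "advance" || x == "complete") = false) :
    ∀ out : List String, pre.foldl bStep (out, false, none) = (out ++ pre, false, none) := by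
  induction pre with
  | nil => intro out; simp
  | cons x t ih =>
    intro out
    have hx := h x (by simp)
    have ht : ∀ y ∈ t, (y == "advance" || y == "complete") = false := fun y hy => h y (by simp [hy])
    simp only [List.foldl_cons, bStep, hx, Bool.not_false, Bool.true_and, Bool.false_and]
    rw [if_neg (by simp), if_neg (by simp)]
    rw [ih ht]
    simp

-- phase 2: after the marker, elicits evict the pending one
theorem fold2 (s : List String) : ∀ (out : List String) (p : Option Nat),
    (∀ k, p = some k → k < out.length) →
    s.foldl bStep (out, true, p) =
      ((if s.any (fun y => y == "elicit") then p.elim out out.eraseIdx else out) ++ keepE s,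
       true,
       if s.any (fun y => y == "elicit") then
         some ((p.elim out out.eraseIdx).length + kIdx s)
       else p) := by
  induction s with
  | nil => intro out p _; simp [keepE]
  | cons x xs ih =>
    intro out p hv
    by_cases hx : x = "elicit"
    · subst hx
      cases p with
      | none =>
        simp only [List.foldl_cons, bStep]
        rw [if_neg (by simp), if_pos (by simp)]
        rw [ih (out ++ ["elicit"]) (some out.length) (by intro k hk; cases hk; simp)]
        by_cases hE : (xs.any (fun y => y == "elicit")) = true
        · simp [hE, Option.elim, erase_len, keepE, kIdx]
        · have hE' : (xs.any (fun y => y == "elicit")) = false := Bool.eq_false_iff.mpr hE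
          simp [hE', Option.elim, keepE, keepE_of_no_elicit xs hE', kIdx]
      | some k =>
        have hk := hv k rfl
        simp only [List.foldl_cons, bStep]
        rw [if_neg (by simp), if_pos (by simp)]
        rw [ih (out.eraseIdx k ++ ["elicit"]) (some (out.eraseIdx k).length)
          (by intro m hm; cases hm; simp)]
        by_cases hE : (xs.any (fun y => y == "elicit")) = true
        · simp [hE, Option.elim, erase_len, keepE, kIdx]
        · have hE' : (xs.any (fun y => y == "elicit")) = false := Bool.eq_false_iff.mpr hE
          simp [hE', Option.elim, keepE, keepE_of_no_elicit xs hE', kIdx]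
    · have hxb : (x == "elicit") = false := by simpa using hx
      simp only [List.foldl_cons, bStep]
      rw [if_neg (by simp), if_neg (by simp [hxb])]
      rw [ih (out ++ [x]) p (by intro k hk; have := hv k hk; simp [this]; omega)]
      by_cases hE : (xs.any (fun y => y == "elicit")) = true
      · cases p with
        | none =>
          simp [hE, hxb, keepE, kIdx]
          omega
        | some k =>
          have hk := hv k rfl
          simp [hE, hxb, keepE, kIdx, erase_lt out x k hk]
          omega
      · have hE' : (xs.any (fun y => y == "elicit")) = false := Bool.eq_false_iff.mpr hE
        simp [hE', hxb, keepE, kIdx]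

-- findIdx? distributes over append
theorem findIdx?_append_aux {α : Type} (p : α → Bool) (l₁ l₂ : List α) :
    (l₁ ++ l₂).findIdx? p
      = (l₁.findIdx? p).orElse (fun _ => (l₂.findIdx? p).map (· + l₁.length)) := by
  induction l₁ with
  | nil =>
    cases h : l₂.findIdx? p <;> simp [h]
  | cons x t ih =>
    simp only [List.cons_append, List.findIdx?_cons]
    by_cases hx : p x
    · simp [hx]
    · simp only [hx, cond_false, ih]
      cases h1 : t.findIdx? p with
      | some j => simp
      | none =>
        cases h2 : l₂.findIdx? p with
        | none => simp
        | some j =>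
          simp only [Option.map_some, Option.orElse, Option.map_some, List.length_cons]
          simp
          omega

theorem rev_findIdx_none (xs : List String) (h : xs.any (fun y => y == "elicit") = false) :
    xs.reverse.findIdx? (fun y => y == "elicit") = none := by
  rw [List.findIdx?_eq_none_iff]
  intro y hy
  have := List.any_eq_false.mp h y (by simpa using hy)
  simpa using this

-- ===== old machinery for reducing A to canonA =====

theorem enum_map {α β : Type} (g : α → β) (l : List α) (s : Int) :
    PySem.List.enumerate (l.map g) s = (PySem.List.enumerate l s).map (fun p => (p.1, g p.2)) := by
  induction l generalizing s with
  | nil => simp [PySem.List.enumerate_nil]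
  | cons x xs ih => simp [PySem.List.enumerate_cons, ih]

theorem enum_enum {α : Type} (l : List α) (s : Int) :
    PySem.List.enumerate (PySem.List.enumerate l s) s
      = (PySem.List.enumerate l s).map (fun p => (p.1, p)) := by
  induction l generalizing s with
  | nil => simp [PySem.List.enumerate_nil]
  | cons x xs ih => simp [PySem.List.enumerate_cons, ih]

theorem enum_shift {α : Type} (l : List α) (s d : Int) :
    PySem.List.enumerate l (s + d) = (PySem.List.enumerate l d).map (fun p => (s + p.1, p.2)) := by
  induction l generalizing d with
  | nil => simp [PySem.List.enumerate_nil]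
  | cons x xs ih =>
    simp only [PySem.List.enumerate_cons, List.map_cons]
    rw [show s + d + 1 = s + (d + 1) by ring, ih]

theorem enum_drop {α : Type} (l : List α) (m : Nat) (s : Int) :
    (PySem.List.enumerate l s).drop m = PySem.List.enumerate (l.drop m) (s + m) := by
  induction l generalizing m s with
  | nil => simp [PySem.List.enumerate_nil]
  | cons x xs ih =>
    cases m with
    | zero => simp
    | succ k =>
      simp only [PySem.List.enumerate_cons, List.drop_succ_cons, ih]
      congr 1
      push_cast
      ring

theorem filter_map_enum {α : Type} (q : α → Bool) (l : List α) (s : Int) :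
    (((PySem.List.enumerate l s).filter (fun p => q p.2)).map (fun p => p.2)) = l.filter q := by
  induction l generalizing s with
  | nil => simp [PySem.List.enumerate_nil]
  | cons x xs ih =>
    simp only [PySem.List.enumerate_cons, List.filter_cons]
    by_cases h : q x <;> simp [h, ih]

theorem find?_enum {α : Type} (q : α → Bool) (l : List α) (s : Int) :
    (PySem.List.enumerate l s).find? (fun p => q p.2)
      = (l.findIdx? q).bind (fun n => (l[n]?).map (fun x => (s + (n : Int), x))) := by
  induction l generalizing s with
  | nil => simp [PySem.List.enumerate_nil]
  | cons x xs ih =>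
    simp only [PySem.List.enumerate_cons, List.find?_cons, List.findIdx?_cons]
    by_cases h : q x
    · simp [h]
    · simp only [h]
      rw [ih]
      cases hfi : xs.findIdx? q with
      | none => simp
      | some n =>
        have hn : n < xs.length := by
          rcases (List.findIdx?_eq_some_iff_getElem).mp hfi with ⟨h1, _⟩
          exact h1
        have hcons : (x :: xs)[1 + n]? = xs[n]? := by rw [Nat.add_comm]; simp
        cases hx : xs[n]? with
        | none => exact absurd (List.getElem?_eq_some_iff.mpr ⟨hn, rfl⟩) (by simp [hx])
        | some v =>
          simp [hcons, hx]
          omega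

theorem findIdx?_map {α β : Type} (f : α → β) (q : β → Bool) (l : List α) :
    (l.map f).findIdx? q = l.findIdx? (fun x => q (f x)) := by
  induction l with
  | nil => simp
  | cons x xs ih => simp [List.findIdx?_cons, ih]

theorem find?_comp {α β : Type} (f : α → β) (q : β → Bool) (l : List α) :
    l.find? (fun k => q (f k)) = ((l.map f).findIdx? q).bind (fun j => l[j]?) := by
  induction l with
  | nil => simp
  | cons x xs ih =>
    simp only [List.map_cons, List.find?_cons, List.findIdx?_cons]
    by_cases h : q (f x)
    · simp [h]
    · simp only [h, cond_false, ih]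
      cases hfi : (xs.map f).findIdx? q <;> simp

theorem foldl_skip2 {α β : Type} (c1 c2 c3 : α → Bool) (f : α → β) (l : List α) (acc : List β) :
    l.foldl (fun acc x =>
        if c1 x then acc
        else if c2 x then (if c3 x then acc else acc ++ [f x])
        else acc ++ [f x]) acc
      = acc ++ (l.filter (fun x => !c1 x && (!c2 x || !c3 x))).map f := by
  induction l generalizing acc with
  | nil => simp
  | cons x xs ih =>
    simp only [List.foldl_cons, List.filter_cons]
    by_cases h1 : c1 x
    · simp [h1, ih]
    · by_cases h2 : c2 x
      · by_cases h3 : c3 x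
        · simp [h1, h2, h3, ih]
        · simp [h1, h2, h3, ih]
      · simp [h1, h2, ih]

theorem any_enum {α : Type} (q : α → Bool) (l : List α) (s : Int) :
    (PySem.List.enumerate l s).any (fun p => q p.2) = l.any q := by
  induction l generalizing s with
  | nil => simp [PySem.List.enumerate_nil]
  | cons x xs ih => simp [PySem.List.enumerate_cons, ih]

theorem A_fold (types : List String) (has : Bool) (adv : Int) (lp : Option Int) :
    ((PySem.List.enumerate ((PySem.List.enumerate types 0).map
        (fun p => (p.2, "content " ++ PySem.Int.toStr p.1, p.1))) 0).foldl
      (fun (acc : List String) (p : Int × String × String × Int) =>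
        if (p.2.1 == "reflect" || p.2.1 == "elicit") && has && decide (p.1 < adv) then acc
        else if p.2.1 == "elicit" && has && decide (adv < p.1) then
          if !(some p.1 == lp) then acc else acc ++ [p.2.1]
        else acc ++ [p.2.1]) ([] : List String))
    = ((PySem.List.enumerate types 0).filter (fun p =>
        !((p.2 == "reflect" || p.2 == "elicit") && has && decide (p.1 < adv)) &&
        (!(p.2 == "elicit" && has && decide (adv < p.1)) || !(!(some p.1 == lp))))).map (fun p => p.2) := by
  rw [enum_map, enum_enum, List.map_map, List.foldl_map]
  simp only [Function.comp_def]
  simp only [foldl_skip2]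
  simp
  rfl

theorem any_enum_M (types : List String) (s : Int) :
    ((PySem.List.enumerate types s).any (fun x => x.2 == "advance" || x.2 == "complete"))
      = types.any (fun t => t == "advance" || t == "complete") := any_enum (fun t => t == "advance" || t == "complete") types s

theorem find?_enum_M (types : List String) (s : Int) :
    (PySem.List.enumerate types s).find? (fun x => x.2 == "advance" || x.2 == "complete")
      = (types.findIdx? (fun t => t == "advance" || t == "complete")).bind
          (fun n => (types[n]?).map (fun x => (s + (n : Int), x))) := find?_enum (fun t => t == "advance" || t == "complete") types s

theorem find_countdown_spec (m : List (String × String × Int)) (n : Nat) :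
    ((PySem.List.pyRange ((m.length : Int) - 1) (n : Int) (-1)).find?
        (fun k => (PySem.List.pyGetD m k ("", "", 0)).1 == "elicit"))
    = (((m.drop (n+1)).reverse.findIdx? (fun x => x.1 == "elicit")).map
        (fun j => ((n : Int) + 1 + (((m.drop (n+1)).length - 1 - j : Nat) : Int)))) := by
  rw [PySem.List.pyRange_neg_one_eq_reverse]
  rw [show ((m.length : Int) - 1 + 1 = (m.length : Int)) by ring]
  rw [find?_comp (fun k => PySem.List.pyGetD m k ("", "", 0)) (fun x => x.1 == "elicit")]
  rw [List.map_reverse, PySem.List.map_pyGetD_pyRange' m ("", "", 0) (by positivity)]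
  rw [show (((n : Int) + 1).toNat) = n + 1 by omega]
  cases hj0 : (m.drop (n+1)).reverse.findIdx? (fun x => x.1 == "elicit") with
  | none => simp
  | some j =>
    have hj : j < (m.drop (n+1)).length := by
      have := (List.findIdx?_eq_some_iff_getElem.mp hj0).1
      simpa using this
    have hlen : n + 1 ≤ m.length := by
      have h2 : (m.drop (n+1)).length = m.length - (n+1) := List.length_drop
      omega
    have hR : (PySem.List.pyRange ((n : Int) + 1) (m.length : Int) 1).length = m.length - (n+1) := by
      rw [PySem.List.length_pyRange_one]
      omega
    have hjR : j < (PySem.List.pyRange ((n : Int) + 1) (m.length : Int) 1).length := by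
      rw [hR]; have h2 : (m.drop (n+1)).length = m.length - (n+1) := List.length_drop; omega
    rw [Option.map_some, Option.bind_some]
    rw [List.getElem?_reverse hjR]
    rw [List.getElem?_eq_getElem (by omega)]
    rw [PySem.List.getElem_pyRange_one]
    have h2 : (m.drop (n+1)).length = m.length - (n+1) := List.length_drop
    congr 1
    rw [hR]
    omega

theorem beq_add_left (a x y : Int) : (a + x == a + y) = (x == y) := by
  by_cases h : x = y
  · simp [h]
  · have h1 : a + x ≠ a + y := by omega
    simp [h, h1]


-- the enumerate/last-index formulation of the suffix filter equals keepE
theorem suffix_keep (s : List String) :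
    (((PySem.List.enumerate s 0).filter (fun p => !(p.2 == "elicit") ||
        some p.1 == ((s.reverse.findIdx? (fun x => x == "elicit")).map
          (fun j => ((s.length - 1 - j : Nat) : Int))))).map (·.2)) = keepE s := by
  induction s with
  | nil => simp [PySem.List.enumerate_nil, keepE]
  | cons x xs ih =>
    have hsh : PySem.List.enumerate xs (0 + 1)
        = (PySem.List.enumerate xs 0).map (fun p => (1 + p.1, p.2)) := by
      simpa using enum_shift xs 1 0
    have hrev : (x :: xs).reverse = xs.reverse ++ [x] := by simp
    by_cases hE : xs.any (fun y => y == "elicit")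
    · -- the last elicit lies in xs
      obtain ⟨y, hy, hye⟩ := List.any_eq_true.mp hE
      have hyr : (xs.reverse.findIdx? (fun y => y == "elicit")).isSome := by
        rw [List.findIdx?_isSome]
        exact List.any_eq_true.mpr ⟨y, by simpa using hy, hye⟩
      obtain ⟨j, hj⟩ := Option.isSome_iff_exists.mp hyr
      have hjlt : j < xs.length := by
        have := (List.findIdx?_eq_some_iff_getElem.mp hj).1
        simpa using this
      have hfi : (x :: xs).reverse.findIdx? (fun y => y == "elicit") = some j := by
        rw [hrev, findIdx?_append_aux, hj]; rfl
      have hcast : ((x :: xs).length - 1 - j : Nat) = ((xs.length - 1 - j : Nat)) + 1 := by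
        simp only [List.length_cons]; omega
      rw [hj] at ih
      simp only [Option.map_some] at ih
      rw [PySem.List.enumerate_cons, hsh, List.filter_cons, hfi]
      simp only [Option.map_some]
      rw [hcast]
      push_cast
      rw [List.filter_map]
      have hcond : List.filter ((fun p : Int × String => (!(p.2 == "elicit") ||
            some p.1 == some (((xs.length - 1 - j : Nat) : Int) + 1))) ∘ (fun p : Int × String => (1 + p.1, p.2)))
            (PySem.List.enumerate xs 0)
          = List.filter (fun p : Int × String => (!(p.2 == "elicit") ||
              some p.1 == some ((xs.length - 1 - j : Nat) : Int))) (PySem.List.enumerate xs 0) := by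
        apply List.filter_congr
        intro q _
        simp only [Function.comp_apply]
        congr 1
        rw [show (((xs.length - 1 - j : Nat) : Int) + 1) = 1 + ((xs.length - 1 - j : Nat) : Int) by ring]
        by_cases h : q.1 = ((xs.length - 1 - j : Nat) : Int)
        · simp [h]
        · have h2 : (1 : Int) + q.1 ≠ 1 + ((xs.length - 1 - j : Nat) : Int) := by omega
          simp [h, h2]
      rw [hcond]
      have h0 : (some (0 : Int) == some (((xs.length - 1 - j : Nat) : Int) + 1)) = false := by
        simp
        omega
      by_cases hx : (x == "elicit") = true
      · rw [if_neg (by simp [hx, h0])]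
        rw [List.map_map]
        rw [show ((fun p : Int × String => p.2) ∘ (fun p : Int × String => (1 + p.1, p.2)))
              = (fun p : Int × String => p.2) from rfl]
        rw [ih]
        simp [keepE, hx, hE]
      · rw [if_pos (by simp [hx])]
        simp only [List.map_cons, List.map_map]
        rw [show ((fun p : Int × String => p.2) ∘ (fun p : Int × String => (1 + p.1, p.2)))
              = (fun p : Int × String => p.2) from rfl]
        rw [ih]
        simp [keepE, hx]
    · -- no elicit in the tail: everything after the head is kept
      have hE' : (xs.any (fun y => y == "elicit")) = false := Bool.eq_false_iff.mpr hE
      have hmem : ∀ p ∈ PySem.List.enumerate xs 0, (p.2 == "elicit") = false := by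
        intro p hp
        rw [PySem.List.mem_enumerate_iff] at hp
        obtain ⟨k, hk, rfl⟩ := hp
        simpa using List.any_eq_false.mp hE' _ (List.getElem_mem hk)
      have htail : ∀ (L : Option Int),
          (((PySem.List.enumerate xs 0).filter (fun p => !(p.2 == "elicit") || some (1 + p.1) == L)).map
            (fun p : Int × String => p.2)) = xs := by
        intro L
        rw [List.filter_eq_self.mpr (by
          intro p hp
          simp [hmem p hp])]
        exact PySem.List.map_snd_enumerate xs 0
      rw [PySem.List.enumerate_cons, hsh, rev_findIdx_none xs hE'] at *
      rw [hrev, findIdx?_append_aux, rev_findIdx_none xs hE']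
      rw [List.filter_cons, List.filter_map]
      by_cases hx : (x == "elicit") = true
      · have hfx : (List.findIdx? (fun y => y == "elicit") [x]).map (· + xs.reverse.length)
            = some xs.length := by simp [List.findIdx?_cons, hx]
        simp only [Option.orElse, hfx]
        have hv0 : (((x :: xs).length - 1 - xs.length : Nat) : Int) = 0 := by
          simp only [List.length_cons]
          omega
        rw [if_pos (by simp [hv0])]
        simp only [List.map_cons, List.map_map]
        rw [show ((fun p : Int × String => p.2) ∘ (fun p : Int × String => (1 + p.1, p.2)))
              = (fun p : Int × String => p.2) from rfl]
        rw [show (List.filter ((fun p : Int × String => (!(p.2 == "elicit") ||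
              some p.1 == Option.map (fun j => (((x :: xs).length - 1 - j : Nat) : Int)) (some xs.length))) ∘
              (fun p : Int × String => (1 + p.1, p.2))) (PySem.List.enumerate xs 0)).map
                (fun p : Int × String => p.2) = xs from by
          rw [List.filter_eq_self.mpr (by intro p hp; simp [hmem p hp])]
          exact PySem.List.map_snd_enumerate xs 0]
        simp [keepE, hx, hE', keepE_of_no_elicit xs hE']
      · have hfx : (List.findIdx? (fun y => y == "elicit") [x]).map (· + xs.reverse.length)
            = none := by simp [List.findIdx?_cons, hx]
        simp only [Option.orElse, hfx]
        rw [if_pos (by simp [hx])]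
        simp only [List.map_cons, List.map_map]
        rw [show ((fun p : Int × String => p.2) ∘ (fun p : Int × String => (1 + p.1, p.2)))
              = (fun p : Int × String => p.2) from rfl]
        rw [show (List.filter ((fun p : Int × String => (!(p.2 == "elicit") ||
              some p.1 == Option.map (fun j => (((x :: xs).length - 1 - j : Nat) : Int)) none)) ∘
              (fun p : Int × String => (1 + p.1, p.2))) (PySem.List.enumerate xs 0)).map
                (fun p : Int × String => p.2) = xs from by
          rw [List.filter_eq_self.mpr (by intro p hp; simp [hmem p hp])]
          exact PySem.List.map_snd_enumerate xs 0]
        simp [keepE, hx, keepE_of_no_elicit xs hE']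

-- closed forms of B
theorem alt_none (types : List String)
    (h : types.findIdx? (fun t => t == "advance" || t == "complete") = none) :
    run_filter_py_alt types = types := by
  rw [alt_foldl]
  rw [fold1 types (by
    intro x hx
    have := List.findIdx?_eq_none_iff.mp h x hx
    simpa using this)]
  simp

theorem alt_some (types : List String) (n : Nat)
    (h : types.findIdx? (fun t => t == "advance" || t == "complete") = some n) :
    run_filter_py_alt types
      = ((types.take n).filter (fun x => !(x == "reflect" || x == "elicit")))
          ++ types.getD n "" :: keepE (types.drop (n + 1)) := by
  obtain ⟨hn, hMn, hmin⟩ := List.findIdx?_eq_some_iff_getElem.mp h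
  have hpre : ∀ x ∈ types.take n, (x == "advance" || x == "complete") = false := by
    intro x hx
    obtain ⟨i, hi, rfl⟩ := List.getElem_of_mem (l := types.take n) hx
    have hi' : i < n := by
      have := List.length_take_le n types
      simp at hi
      omega
    have := hmin i hi'
    simpa using this
  have hgd : types.getD n "" = types[n] := by
    rw [List.getD_eq_getElem?_getD, List.getElem?_eq_getElem hn, Option.getD_some]
  rw [alt_foldl]
  conv_lhs => rw [show types = types.take n ++ types[n] :: types.drop (n + 1) from by
    rw [← List.drop_eq_getElem_cons hn, List.take_append_drop]]
  rw [List.foldl_append, fold1 (types.take n) hpre, List.foldl_cons]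
  rw [show bStep (([] : List String) ++ types.take n, false, none) types[n]
        = (((types.take n).filter (fun x => !(x == "reflect" || x == "elicit"))) ++ [types[n]], true, none) from by
    simp only [bStep, List.nil_append]
    rw [if_pos (by simp [hMn])]]
  rw [fold2 (types.drop (n + 1)) _ none (by intro k hk; cases hk)]
  simp [hgd, List.getElem?_eq_getElem hn]

theorem A_eq_canonA (types : List String) : run_filter_py types = canonA types := by
  simp only [run_filter_py, canonA]
  rw [A_fold]
  simp only [enum_map, enum_enum, List.map_map, Function.comp_def, List.length_map,
    PySem.List.length_enumerate, List.any_map, any_enum_M, List.find?_map, find?_enum_M]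
  cases hfi : types.findIdx? (fun t => t == "advance" || t == "complete") with
  | none =>
    have hany : types.any (fun t => t == "advance" || t == "complete") = false := by
      rw [List.any_eq_false]
      intro x hx
      have h := List.findIdx?_eq_none_iff.mp hfi
      simpa using h x hx
    simp [hany, PySem.List.map_snd_enumerate]
  | some n =>
    obtain ⟨hn, hMn, -⟩ := List.findIdx?_eq_some_iff_getElem.mp hfi
    have hany : types.any (fun t => t == "advance" || t == "complete") = true :=
      List.any_eq_true.mpr ⟨types[n], List.getElem_mem hn, hMn⟩
    have hgn : types[n]? = some types[n] := List.getElem?_eq_getElem hn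
    simp only [hany, hgn, Option.bind_some, Option.map_some, Option.getD_some,
      zero_add, if_true]
    have hml : (List.map (fun p : Int × String => (p.2, "content " ++ PySem.Int.toStr p.1, p.1))
        (PySem.List.enumerate types)).length = types.length := by simp
    have hcd := find_countdown_spec (List.map (fun p : Int × String =>
        (p.2, "content " ++ PySem.Int.toStr p.1, p.1)) (PySem.List.enumerate types)) n
    rw [hml] at hcd
    rw [hcd]
    have hdrop : (List.map (fun p : Int × String => (p.2, "content " ++ PySem.Int.toStr p.1, p.1))
          (PySem.List.enumerate types)).drop (n+1)
        = (PySem.List.enumerate (types.drop (n+1)) ((n:Int)+1)).map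
            (fun p : Int × String => (p.2, "content " ++ PySem.Int.toStr p.1, p.1)) := by
      rw [← List.map_drop, enum_drop]
      norm_num
    rw [hdrop]
    have hfidx : ((PySem.List.enumerate (types.drop (n+1)) ((n:Int)+1)).map
          (fun p : Int × String => (p.2, "content " ++ PySem.Int.toStr p.1, p.1))).reverse.findIdx?
            (fun x => x.1 == "elicit")
        = (types.drop (n+1)).reverse.findIdx? (fun x => x == "elicit") := by
      rw [← List.map_reverse, findIdx?_map]
      have h2 : (types.drop (n+1)).reverse
          = (PySem.List.enumerate (types.drop (n+1)) ((n:Int)+1)).reverse.map (fun p => p.2) := by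
        rw [List.map_reverse, PySem.List.map_snd_enumerate]
      rw [h2, findIdx?_map]
    rw [hfidx]
    have hslen : ((PySem.List.enumerate (types.drop (n+1)) ((n:Int)+1)).map
        (fun p : Int × String => (p.2, "content " ++ PySem.Int.toStr p.1, p.1))).length
        = (types.drop (n+1)).length := by simp
    rw [hslen]
    have hgd : types.getD n "" = types[n] := by
      rw [List.getD_eq_getElem?_getD, hgn, Option.getD_some]
    rw [hgd]
    have hsplit : PySem.List.enumerate types 0
        = PySem.List.enumerate (types.take n) 0
          ++ ((n:Int), types[n]) :: PySem.List.enumerate (types.drop (n+1)) ((n:Int)+1) := by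
      conv_lhs => rw [show types = types.take n ++ types[n] :: types.drop (n+1) by
        rw [← List.drop_eq_getElem_cons hn, List.take_append_drop]]
      rw [PySem.List.enumerate_append, PySem.List.enumerate_cons]
      have : (types.take n).length = n := by simp [List.length_take, le_of_lt hn]
      rw [this]
      norm_num
    rw [hsplit, List.filter_append, List.filter_cons, List.map_append]
    simp only [show decide ((n:Int) < (n:Int)) = false by simp, Bool.and_false, Bool.not_false,
      Bool.true_and, Bool.true_or, if_true, List.map_cons]
    rw [show (types.take n).filter (fun x => !(x == "reflect" || x == "elicit")) ++ [types[n]]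
          ++ (((PySem.List.enumerate (types.drop (n+1)) 0).filter (fun p =>
              !(p.2 == "elicit") || some p.1 ==
                ((types.drop (n+1)).reverse.findIdx? (fun x => x == "elicit")).map
                  (fun j => (((types.drop (n+1)).length - 1 - j : Nat) : Int)))).map (fun p => p.2))
        = (types.take n).filter (fun x => !(x == "reflect" || x == "elicit")) ++ types[n]
          :: (((PySem.List.enumerate (types.drop (n+1)) 0).filter (fun p =>
              !(p.2 == "elicit") || some p.1 ==
                ((types.drop (n+1)).reverse.findIdx? (fun x => x == "elicit")).map
                  (fun j => (((types.drop (n+1)).length - 1 - j : Nat) : Int)))).map (fun p => p.2))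
        by simp]
    congr 1
    · rw [show (types.take n).filter (fun x => !(x == "reflect" || x == "elicit"))
            = ((PySem.List.enumerate (types.take n) 0).filter
                (fun p => !(p.2 == "reflect" || p.2 == "elicit"))).map (fun p => p.2)
          from (filter_map_enum (fun x => !(x == "reflect" || x == "elicit")) (types.take n) 0).symm]
      congr 1
      apply List.filter_congr
      intro p hp
      rw [PySem.List.mem_enumerate_iff] at hp
      obtain ⟨k, hk, rfl⟩ := hp
      have hk' : k < n := by
        have := List.length_take_le n types
        simp at hk
        omega
      simp [hk', show ¬(n < k) by omega]
    · congr 1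
      rw [show PySem.List.enumerate (types.drop (n+1)) ((n:Int)+1)
            = (PySem.List.enumerate (types.drop (n+1)) 0).map (fun p => ((n:Int)+1+p.1, p.2))
          from by simpa using enum_shift (types.drop (n+1)) ((n:Int)+1) 0]
      rw [List.filter_map, List.map_map]
      simp only [Function.comp_def]
      congr 1
      apply List.filter_congr
      intro p hp
      rw [PySem.List.mem_enumerate_iff] at hp
      obtain ⟨k, hk, rfl⟩ := hp
      cases hj0 : (types.drop (n+1)).reverse.findIdx? (fun x => x == "elicit") with
      | none =>
        simp [hj0, show ¬((n:Int)+1+(k:Int) < (n:Int)) by omega,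
          show ((n:Int) < (n:Int)+1+(k:Int)) by omega]
      | some j =>
        simp [hj0, show ¬((n:Int)+1+(k:Int) < (n:Int)) by omega,
          show ((n:Int) < (n:Int)+1+(k:Int)) by omega, beq_add_left]

theorem canonA_eq_alt (types : List String) : canonA types = run_filter_py_alt types := by
  unfold canonA
  cases hfi : types.findIdx? (fun t => t == "advance" || t == "complete") with
  | none => rw [alt_none types hfi]
  | some n =>
    dsimp only
    rw [alt_some types n hfi, suffix_keep]
    simp

-- ===== VERDICT (by name: the statement is the Claim_ definition above) =====
theorem run_filter_py_spec : Claim_equal_run_filter_py := by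
  intro types _
  unfold Spec_run_filter_py
  rw [A_eq_canonA, canonA_eq_alt]
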